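-- pv_equiv track=rewrite | github.com/edu-rinaldi/Python-Homework | Homework Python 2017-18/homework01/program03.py | creaCoppieChiave
-- ===== SOURCE A (Python) =====
-- def getSequenzaDisordinata(chiave):
--     chiaveDisordinata = []
--     for i in range(len(chiave)-1,-1,-1):
--         if chiave[chiave.rfind(chiave[i])] in chiaveDisordinata:
--             continue
--         if not 'a'<= chiave[chiave.rfind(chiave[i])] <= 'z':
--             continue
--         chiaveDisordinata.append(chiave[chiave.rfind(chiave[i])])
--     return list(reversed(chiaveDisordinata))
--
-- def getSequenzaOrdinata(chiave):
--
--     chiaveOrdinata = []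
--     for i in range(len(chiave) - 1, -1, -1):
--         if chiave[chiave.rfind(chiave[i])] in chiaveOrdinata:
--             continue
--         if not 'a' <= chiave[chiave.rfind(chiave[i])] <= 'z':
--             continue
--         chiaveOrdinata.append(chiave[chiave.rfind(chiave[i])])
--     chiaveOrdinata.sort()
--     return chiaveOrdinata
--
-- def creaCoppieChiave(chiave,codifica=True):
--
--     dizCoppie = {}
--     seqOrd = getSequenzaOrdinata(chiave)
--     seqDis = getSequenzaDisordinata(chiave)
--     lenSeq = len(seqOrd)
--     for x in range(lenSeq):
--         if codifica:
--             dizCoppie[seqOrd[x]] = seqDis[x]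
--         else:
--             dizCoppie[seqDis[x]] = seqOrd[x]
--     return dizCoppie
-- ===== SOURCE B (Python) =====
-- def creaCoppieChiave(chiave, codifica=True):
--     # One forward pass: last index of each lowercase letter.
--     last = {}
--     for i, c in enumerate(chiave):
--         if 'a' <= c <= 'z':
--             last[c] = i
--     seqOrd = sorted(last)
--     seqDis = sorted(last, key=last.get)
--     dizCoppie = {}
--     for o, s in zip(seqOrd, seqDis):
--         if codifica:
--             dizCoppie[o] = s
--         else:
--             dizCoppie[s] = o
--     return dizCoppie
-- ===== Notes on version B (the rewrite author's own statement) =====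
-- stated objective: faster
-- what changed: Replaces A's two backward index scans that call chiave.rfind at every position (and a separate sort pass) by a single forward pass recording each lowercase letter's last index in a dict, from which both letter sequences are obtained as sorted(keys) and sorted(keys, key=last index) and paired with zip.
import Mathlib
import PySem

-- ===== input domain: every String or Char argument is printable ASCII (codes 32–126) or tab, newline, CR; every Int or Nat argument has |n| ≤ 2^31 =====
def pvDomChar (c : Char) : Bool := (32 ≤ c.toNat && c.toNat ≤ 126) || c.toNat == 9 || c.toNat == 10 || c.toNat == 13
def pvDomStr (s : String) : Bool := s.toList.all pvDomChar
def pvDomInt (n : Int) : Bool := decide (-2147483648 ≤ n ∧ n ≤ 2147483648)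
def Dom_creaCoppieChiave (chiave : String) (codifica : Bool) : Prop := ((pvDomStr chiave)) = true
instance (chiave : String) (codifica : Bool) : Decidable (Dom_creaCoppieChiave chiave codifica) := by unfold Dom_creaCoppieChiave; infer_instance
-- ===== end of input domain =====

-- B replaces A's two quadratic backward rfind-scans by one forward pass recording each
-- lowercase letter's last index, deriving both letter sequences by sorting (objective: faster, O(n^2) -> O(n log n)).

-- ===== PORT A =====
-- helper of A: backward scan collecting (then reversing) the distinct lowercase letters,
-- each looked up at its last occurrence (chiave.rfind); Python's 1-char-string comparisons
-- 'a' <= x <= 'z' are the same Char comparisons; the `none` match arms are the IndexError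
-- branches of chiave[...], unreachable because every index used is in range.
def getSequenzaDisordinataA (chiave : List Char) : List Char :=
  ((PySem.List.pyRange ((chiave.length : Int) - 1) (-1) (-1)).foldl
    (fun acc i =>
      match PySem.List.pyGet? chiave i with
      | none => acc
      | some ci =>
        match PySem.List.pyGet? chiave (PySem.Chars.rfind chiave [ci]) with
        | none => acc
        | some c =>
          if acc.contains c then acc
          else if decide ('a' ≤ c) && decide (c ≤ 'z') then acc ++ [c]
          else acc) []).reverse

-- helper of A: the same backward scan, then .sort() (sorting 1-char strings = sorting chars)
def getSequenzaOrdinataA (chiave : List Char) : List Char :=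
  PySem.List.sorted
    ((PySem.List.pyRange ((chiave.length : Int) - 1) (-1) (-1)).foldl
      (fun acc i =>
        match PySem.List.pyGet? chiave i with
        | none => acc
        | some ci =>
          match PySem.List.pyGet? chiave (PySem.Chars.rfind chiave [ci]) with
          | none => acc
          | some c =>
            if acc.contains c then acc
            else if decide ('a' ≤ c) && decide (c ≤ 'z') then acc ++ [c]
            else acc) []) (fun c => c)

-- dict[str, str] of 1-char strings kept as Dict Char Char; items wrapped to String at return
def creaCoppieChiave (chiave : String) (codifica : Bool) : List (String × String) :=
  let seqOrd := getSequenzaOrdinataA chiave.toList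
  let seqDis := getSequenzaDisordinataA chiave.toList
  let lenSeq : Int := seqOrd.length
  let dizCoppie : PySem.Dict Char Char :=
    (PySem.List.pyRange 0 lenSeq).foldl
      (fun d x =>
        if codifica then d.insert (PySem.List.pyGetD seqOrd x ' ') (PySem.List.pyGetD seqDis x ' ')
        else d.insert (PySem.List.pyGetD seqDis x ' ') (PySem.List.pyGetD seqOrd x ' '))
      PySem.Dict.empty
  dizCoppie.items.map (fun p => (String.ofList [p.1], String.ofList [p.2]))

-- ===== PORT B =====
-- one forward pass: last index of each lowercase letter, then two sorts and one zip;
-- key=last.get always hits a stored key, so it is getD with an arbitrary default (0)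
def creaCoppieChiave_alt (chiave : String) (codifica : Bool) : List (String × String) :=
  let last : PySem.Dict Char Int :=
    (PySem.List.enumerate chiave.toList 0).foldl
      (fun d p => if decide ('a' ≤ p.2) && decide (p.2 ≤ 'z') then d.insert p.2 p.1 else d)
      PySem.Dict.empty
  let seqOrd := PySem.List.sorted last.keys (fun c => c)
  let seqDis := PySem.List.sorted last.keys (fun c => last.getD c 0)
  let dizCoppie : PySem.Dict Char Char :=
    (seqOrd.zip seqDis).foldl
      (fun d p => if codifica then d.insert p.1 p.2 else d.insert p.2 p.1)
      PySem.Dict.empty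
  dizCoppie.items.map (fun p => (String.ofList [p.1], String.ofList [p.2]))

-- ===== PRECONDITION & SPEC =====
def Spec_creaCoppieChiave (chiave : String) (codifica : Bool) (out : List (String × String)) : Prop := out = creaCoppieChiave_alt chiave codifica
instance (chiave : String) (codifica : Bool) (out : List (String × String)) : Decidable (Spec_creaCoppieChiave chiave codifica out) := by unfold Spec_creaCoppieChiave; infer_instance

-- ===== CLAIM (what is proved, stated in full; the proofs are below) =====
def Claim_equal_creaCoppieChiave : Prop := ∀ (chiave : String) (codifica : Bool), Dom_creaCoppieChiave chiave codifica → Spec_creaCoppieChiave chiave codifica (creaCoppieChiave chiave codifica)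

-- ===== LEMMAS AND PROOFS =====

-- the lowercase test both programs use
def pvLow (c : Char) : Bool := decide ('a' ≤ c) && decide (c ≤ 'z')

lemma pv_prefix_singleton (c : Char) (l : List Char) :
    [c].isPrefixOf l = true ↔ l[0]? = some c := by
  cases l with
  | nil => simp [List.isPrefixOf]
  | cons b r =>
    simp only [List.isPrefixOf, Bool.and_eq_true, beq_iff_eq, List.getElem?_cons_zero,
      Option.some.injEq]
    constructor
    · rintro ⟨h, _⟩; exact h.symm
    · intro h; exact ⟨h.symm, by simp [List.isPrefixOf]⟩

-- rfind.go s [c] x returns some index j ≤ x with s[j] = c, when one exists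
lemma pv_go_find (s : List Char) (c : Char) :
    ∀ (x : Nat), (∃ j, j ≤ x ∧ s[j]? = some c) →
      ∃ j, j ≤ x ∧ PySem.Chars.rfind.go s [c] x = (j : Int) ∧ s[j]? = some c := by
  intro x
  induction x with
  | zero =>
    rintro ⟨j, hj, hs⟩
    interval_cases j
    refine ⟨0, le_refl _, ?_, hs⟩
    simp only [PySem.Chars.rfind.go]
    rw [if_pos]
    · rfl
    · rw [pv_prefix_singleton]; simpa using hs
  | succ k ih =>
    rintro ⟨j, hj, hs⟩
    by_cases hpre : [c].isPrefixOf (List.drop (k+1) s) = true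
    · refine ⟨k+1, le_refl _, ?_, ?_⟩
      · simp only [PySem.Chars.rfind.go]
        rw [if_pos hpre]
      · rw [pv_prefix_singleton] at hpre
        rw [← List.head?_eq_getElem?, List.head?_drop] at hpre
        exact hpre
    · have hjk : j ≤ k := by
        rcases Nat.lt_succ_iff_lt_or_eq.mp (Nat.lt_succ_of_le hj) with h | h
        · omega
        · exfalso; apply hpre
          rw [pv_prefix_singleton, ← List.head?_eq_getElem?, List.head?_drop]
          rw [← h]; exact hs
      obtain ⟨j', hj', hgo, hs'⟩ := ih ⟨j, hjk, hs⟩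
      refine ⟨j', le_trans hj' (Nat.le_succ k), ?_, hs'⟩
      simp only [PySem.Chars.rfind.go]
      rw [if_neg hpre]
      exact hgo

-- chiave[chiave.rfind(chiave[i])] is chiave[i] itself
lemma pv_rfind_mem (s : List Char) {c : Char} (h : c ∈ s) :
    PySem.List.pyGet? s (PySem.Chars.rfind s [c]) = some c := by
  obtain ⟨i, hi, hg⟩ := List.getElem_of_mem h
  have hex : ∃ j, j ≤ s.length ∧ s[j]? = some c :=
    ⟨i, le_of_lt hi, by rw [List.getElem?_eq_getElem hi, hg]⟩
  obtain ⟨j, hj, hgo, hs⟩ := pv_go_find s c s.length hex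
  show PySem.List.pyGet? s (PySem.Chars.rfind.go s [c] s.length) = some c
  rw [hgo, PySem.List.pyGet?_natCast]
  exact hs

-- a countdown index loop over xs is a forward fold over xs.reverse
lemma pv_foldl_countdown {β : Type} (xs : List Char) (d : Char) (g : β → Char → β) (init : β) :
    (PySem.List.pyRange ((xs.length : Int) - 1) (-1) (-1)).foldl
        (fun acc i => g acc (PySem.List.pyGetD xs i d)) init
      = xs.reverse.foldl g init := by
  rw [PySem.List.pyRange_neg_one_eq_reverse]
  have h1 : ((-1 : Int) + 1) = 0 := by norm_num
  have h2 : ((xs.length : Int) - 1 + 1) = (xs.length : Int) := by ring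
  rw [h1, h2]
  conv_rhs => rw [← PySem.List.map_pyGetD_pyRange_zero xs d]
  rw [← List.map_reverse, List.foldl_map]
  simp

-- A's backward scan collects exactly the first occurrences along the reversed lowercase filter
lemma pv_rawA (cs : List Char) :
    (PySem.List.pyRange ((cs.length : Int) - 1) (-1) (-1)).foldl
      (fun acc i =>
        match PySem.List.pyGet? cs i with
        | none => acc
        | some ci =>
          match PySem.List.pyGet? cs (PySem.Chars.rfind cs [ci]) with
          | none => acc
          | some c =>
            if acc.contains c then acc
            else if decide ('a' ≤ c) && decide (c ≤ 'z') then acc ++ [c]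
            else acc) []
    = PySem.Set.ofList ((cs.filter pvLow).reverse) := by
  rw [PySem.List.foldl_congr_mem _ _
    (fun acc i => if pvLow (PySem.List.pyGetD cs i ' ') = true
      then PySem.Set.add acc (PySem.List.pyGetD cs i ' ') else acc) _ ?_]
  · rw [pv_foldl_countdown cs ' '
      (fun acc c => if pvLow c = true then PySem.Set.add acc c else acc) []]
    rw [← List.filter_reverse]
    rw [show ([] : List Char) = (PySem.Set.empty : PySem.Set Char) from rfl]
    rw [show (PySem.Set.ofList (cs.reverse.filter pvLow) : List Char)
        = (cs.reverse.filter pvLow).foldl PySem.Set.add PySem.Set.empty from rfl]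
    rw [List.foldl_filter]
  · intro acc i hi
    rw [PySem.List.mem_pyRange_neg_one] at hi
    have h0 : 0 ≤ i := by omega
    have h1 : i < (cs.length : Int) := by omega
    have hmem : cs[i.toNat] ∈ cs := List.getElem_mem _
    simp only [PySem.List.pyGet?_eq_some_getElem cs h0 h1, pv_rfind_mem cs hmem]
    have hD : PySem.List.pyGetD cs i ' ' = cs[i.toNat] := by
      simp [PySem.List.pyGetD, PySem.List.pyGet?_eq_some_getElem cs h0 h1]
    rw [hD]
    simp only [PySem.Set.add_eq_ite, pvLow]
    by_cases hm : cs[i.toNat] ∈ acc <;>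
      by_cases hl : 'a' ≤ cs[i.toNat] ∧ cs[i.toNat] ≤ 'z' <;>
        simp [hm, hl]

-- the value B's last-index dict stores for c: the fst of the last pair whose snd is c
def pvLastVal : List (Int × Char) → Char → Option Int
  | [], _ => none
  | q :: t, c =>
    match pvLastVal t c with
    | some v => some v
    | none => if q.2 = c then some q.1 else none

lemma pv_lastVal_append (t : List (Int × Char)) (q : Int × Char) (c : Char) :
    pvLastVal (t ++ [q]) c = if q.2 = c then some q.1 else pvLastVal t c := by
  induction t with
  | nil => simp [pvLastVal]
  | cons x r ih =>
    simp only [List.cons_append, pvLastVal, ih]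
    by_cases h : q.2 = c <;> simp [h]

lemma pv_lastVal_some_mem (ps : List (Int × Char)) (c : Char) (v : Int) :
    pvLastVal ps c = some v → v ∈ ps.map Prod.fst := by
  induction ps with
  | nil => simp [pvLastVal]
  | cons q t ih =>
    simp only [pvLastVal]
    cases hl : pvLastVal t c with
    | some w => intro h; cases h; simpa using Or.inr (by simpa using ih hl)
    | none =>
      by_cases h : q.2 = c <;> simp [h]
      intro hv; simp [hv]

lemma pv_lastVal_isSome (ps : List (Int × Char)) (c : Char) :
    c ∈ ps.map Prod.snd → (pvLastVal ps c).isSome := by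
  induction ps with
  | nil => simp
  | cons q t ih =>
    intro h
    simp only [pvLastVal]
    cases hl : pvLastVal t c with
    | some v => simp
    | none =>
      have hnone : ¬ c ∈ t.map Prod.snd := by
        intro hc
        have := ih hc
        rw [hl] at this
        simp at this
      have hc : q.2 = c := by
        rcases (by simpa using h) with h1 | h2
        · exact h1.symm
        · exact absurd (by simpa using h2) hnone
      simp [hc]

lemma pv_get?_foldl_insert (ps : List (Int × Char)) :
    ∀ (d : PySem.Dict Char Int) (c : Char),
      (ps.foldl (fun d q => d.insert q.2 q.1) d).get? c
        = match pvLastVal ps c with | some v => some v | none => d.get? c := by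
  induction ps with
  | nil => intro d c; simp [pvLastVal]
  | cons q t ih =>
    intro d c
    simp only [List.foldl_cons, ih, pvLastVal]
    cases hl : pvLastVal t c with
    | some v => simp
    | none =>
      simp only
      rw [PySem.Dict.get?_insert]
      by_cases h : q.2 = c
      · subst h; simp
      · rw [if_neg (Ne.symm h), if_neg h]

-- MAIN: with strictly increasing indices, the first-occurrence dedup of the reversed
-- letter column is strictly decreasing in the stored last index
lemma pv_main (ps : List (Int × Char)) (hp : (ps.map Prod.fst).Pairwise (· < ·)) :
    (PySem.Set.ofList ((ps.map Prod.snd).reverse) : List Char).Pairwise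
      (fun a b => (pvLastVal ps b).getD 0 < (pvLastVal ps a).getD 0) := by
  induction ps using List.reverseRecOn with
  | nil => simp [PySem.Set.ofList]
  | append_singleton t q ih =>
    have hp' : (t.map Prod.fst).Pairwise (· < ·) := by
      have := hp; rw [List.map_append, List.pairwise_append] at this; exact this.1
    have hlt : ∀ v ∈ t.map Prod.fst, v < q.1 := by
      have := hp; rw [List.map_append, List.pairwise_append] at this
      intro v hv; exact this.2.2 v hv q.1 (by simp)
    rw [List.map_append, List.reverse_append]
    simp only [List.map_cons, List.map_nil, List.reverse_cons, List.reverse_nil,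
      List.nil_append, List.singleton_append]
    rw [PySem.Set.ofList_cons]
    constructor
    · intro b hb
      have hbne : b ≠ q.2 := by
        simp only [PySem.Set.discard, List.mem_filter] at hb
        simpa using hb.2
      have hbmem : b ∈ t.map Prod.snd := by
        simp only [PySem.Set.discard, List.mem_filter] at hb
        have := hb.1
        rw [PySem.Set.mem_ofList] at this
        simpa using this
      rw [pv_lastVal_append, pv_lastVal_append, if_pos rfl, if_neg (Ne.symm hbne)]
      obtain ⟨v, hv⟩ := Option.isSome_iff_exists.mp (pv_lastVal_isSome t b hbmem)
      rw [hv]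
      have := pv_lastVal_some_mem t b v hv
      simpa using hlt v this
    · have hsub : ((PySem.Set.ofList ((t.map Prod.snd).reverse) : List Char).discard q.2).Sublist
          (PySem.Set.ofList ((t.map Prod.snd).reverse) : List Char) := by
        simp only [PySem.Set.discard]
        exact List.filter_sublist
      refine List.Pairwise.imp_of_mem ?_ (List.Pairwise.sublist hsub (ih hp'))
      intro a b ha hb hr
      have hane : a ≠ q.2 := by simp only [PySem.Set.discard, List.mem_filter] at ha; simpa using ha.2
      have hbne : b ≠ q.2 := by simp only [PySem.Set.discard, List.mem_filter] at hb; simpa using hb.2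
      rw [pv_lastVal_append, pv_lastVal_append, if_neg (Ne.symm hane), if_neg (Ne.symm hbne)]
      exact hr

lemma pv_map_range_zip {α : Type} (O : List α) :
    ∀ (S : List α) (d₁ d₂ : α), O.length = S.length →
      (List.range O.length).map (fun k => (O.getD k d₁, S.getD k d₂)) = O.zip S := by
  induction O with
  | nil => simp
  | cons a O' ih =>
    intro S d₁ d₂ h
    cases S with
    | nil => simp at h
    | cons b S' =>
      simp only [List.length_cons, List.range_succ_eq_map, List.map_cons, List.map_map]
      simp only [List.getD_cons_zero, List.zip_cons_cons]
      congr 1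
      have := ih S' d₁ d₂ (by simpa using h)
      simpa [Function.comp] using this

-- an index loop over two same-length lists is a fold over their zip
lemma pv_foldl_range_zip {α β : Type} (O S : List α) (h : O.length = S.length)
    (g : β → α × α → β) (d : α) (init : β) :
    (PySem.List.pyRange 0 (O.length : Int)).foldl
        (fun acc x => g acc (PySem.List.pyGetD O x d, PySem.List.pyGetD S x d)) init
      = (O.zip S).foldl g init := by
  rw [PySem.List.pyRange_zero_nat, List.foldl_map]
  rw [← pv_map_range_zip O S d d h, List.foldl_map]
  simp [PySem.List.pyGetD_natCast]

lemma pv_map_snd_filter (l : List (Int × Char)) (p : Char → Bool) :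
    (l.filter (fun q => p q.2)).map Prod.snd = (l.map Prod.snd).filter p := by
  induction l with
  | nil => simp
  | cons q t ih => by_cases h : p q.2 <;> simp [h, ih]

lemma pv_keys (ps : List (Int × Char)) :
    (ps.foldl (fun d q => d.insert q.2 q.1) (PySem.Dict.empty : PySem.Dict Char Int)).keys
      = PySem.Set.ofList (ps.map Prod.snd) := by
  rw [PySem.Dict.keys_foldl_insert_key ps Prod.snd (fun _ q => q.1)]
  simp [PySem.Set.update_eq_foldl, PySem.Set.ofList, PySem.Dict.keys_empty, PySem.Set.empty]

-- B's dict as a fold over the filtered enumerate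
def pvPs (cs : List Char) : List (Int × Char) :=
  (PySem.List.enumerate cs 0).filter (fun p => pvLow p.2)

def pvLastD (cs : List Char) : PySem.Dict Char Int :=
  (PySem.List.enumerate cs 0).foldl
    (fun d p => if pvLow p.2 then d.insert p.2 p.1 else d) PySem.Dict.empty

lemma pv_lastD_eq (cs : List Char) :
    pvLastD cs = (pvPs cs).foldl (fun d q => d.insert q.2 q.1) PySem.Dict.empty := by
  unfold pvLastD pvPs
  rw [List.foldl_filter]

lemma pv_get?_lastD (cs : List Char) (c : Char) :
    (pvLastD cs).get? c = pvLastVal (pvPs cs) c := by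
  rw [pv_lastD_eq, pv_get?_foldl_insert]
  cases pvLastVal (pvPs cs) c <;> simp [PySem.Dict.get?_empty]

lemma pv_getD_lastD (cs : List Char) (c : Char) :
    (pvLastD cs).getD c 0 = (pvLastVal (pvPs cs) c).getD 0 := by
  show ((pvLastD cs).get? c).getD 0 = _
  rw [pv_get?_lastD]

lemma pv_chars (cs : List Char) : (pvPs cs).map Prod.snd = cs.filter pvLow := by
  unfold pvPs
  rw [pv_map_snd_filter, PySem.List.map_snd_enumerate]

lemma pv_keys_lastD (cs : List Char) :
    (pvLastD cs).keys = PySem.Set.ofList (cs.filter pvLow) := by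
  rw [pv_lastD_eq, pv_keys, pv_chars]

lemma pv_hp (cs : List Char) : ((pvPs cs).map Prod.fst).Pairwise (· < ·) := by
  have hs : (pvPs cs).Sublist (PySem.List.enumerate cs 0) := List.filter_sublist
  refine List.Pairwise.sublist (List.Sublist.map Prod.fst hs) ?_
  rw [PySem.List.map_fst_enumerate]
  exact PySem.List.pairwise_lt_pyRange_one 0 _

lemma pv_seqDis (cs : List Char) :
    getSequenzaDisordinataA cs
      = PySem.List.sorted (pvLastD cs).keys (fun c => (pvLastD cs).getD c 0) := by
  unfold getSequenzaDisordinataA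
  rw [pv_rawA]
  symm
  apply PySem.List.sorted_eq_of_perm_of_pairwise_lt
  · rw [pv_keys_lastD]
    rw [List.perm_ext_iff_of_nodup (List.nodup_reverse.mpr (PySem.Set.nodup_ofList _))
      (PySem.Set.nodup_ofList _)]
    intro a
    rw [List.mem_reverse, PySem.Set.mem_ofList, PySem.Set.mem_ofList, List.mem_reverse]
  · rw [List.pairwise_reverse]
    have hm := pv_main (pvPs cs) (pv_hp cs)
    rw [pv_chars] at hm
    refine hm.imp ?_
    intro a b h
    rw [pv_getD_lastD, pv_getD_lastD]
    exact h

lemma pv_seqOrd (cs : List Char) :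
    getSequenzaOrdinataA cs = PySem.List.sorted (pvLastD cs).keys (fun c => c) := by
  unfold getSequenzaOrdinataA
  rw [pv_rawA]
  apply PySem.List.sorted_eq_sorted_of_perm _ _ _ (fun a b h => h)
  rw [pv_keys_lastD]
  rw [List.perm_ext_iff_of_nodup (PySem.Set.nodup_ofList _) (PySem.Set.nodup_ofList _)]
  intro a
  rw [PySem.Set.mem_ofList, PySem.Set.mem_ofList, List.mem_reverse]

-- ===== VERDICT (by name: the statement is the Claim_ definition above) =====
set_option maxHeartbeats 1000000 in
theorem creaCoppieChiave_spec : Claim_equal_creaCoppieChiave := by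
  intro chiave codifica _
  show creaCoppieChiave chiave codifica = creaCoppieChiave_alt chiave codifica
  simp only [creaCoppieChiave, creaCoppieChiave_alt]
  rw [show ((PySem.List.enumerate chiave.toList 0).foldl
      (fun d p => if decide ('a' ≤ p.2) && decide (p.2 ≤ 'z') then d.insert p.2 p.1 else d)
      PySem.Dict.empty) = pvLastD chiave.toList from rfl]
  rw [pv_seqOrd, pv_seqDis]
  have hlen : (PySem.List.sorted (pvLastD chiave.toList).keys (fun c => c)).length
      = (PySem.List.sorted (pvLastD chiave.toList).keys (fun c => (pvLastD chiave.toList).getD c 0)).length := by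
    rw [PySem.List.length_sorted, PySem.List.length_sorted]
  have hz := pv_foldl_range_zip _ _ hlen
    (fun d p => if codifica then d.insert p.1 p.2 else d.insert p.2 p.1) ' ' PySem.Dict.empty
  exact congrArg (fun d : PySem.Dict Char Char =>
    d.items.map (fun p => (String.ofList [p.1], String.ofList [p.2]))) hz
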